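-- pv_equiv track=rewrite | github.com/EdsonEddy/perfilTesis2 | workspace_thesis/dataset/py-tests/1756/145715.py | serie
-- ===== SOURCE A (Python) =====
-- def serie(s):
--     s=s%6
--     r=2**(s+1)
--     x=0
--     y=str(r)
--     con=True
--     while con==True:
--         for a in y:
--             x=x+int(a)
--         if x<10:
--             con=False
--         else:
--             y=str(x)
--             x=0
--     return(x)
-- ===== SOURCE B (Python) =====
-- def serie(s):
--     r = 2 ** ((s % 6) + 1)
--     return 1 + (r - 1) % 9
-- ===== Notes on version B (the rewrite author's own statement) =====
-- stated objective: simpler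
-- what changed: Replaced the repeated string-conversion digit-summing while/for loop with the closed-form digital-root formula.
import Mathlib
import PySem

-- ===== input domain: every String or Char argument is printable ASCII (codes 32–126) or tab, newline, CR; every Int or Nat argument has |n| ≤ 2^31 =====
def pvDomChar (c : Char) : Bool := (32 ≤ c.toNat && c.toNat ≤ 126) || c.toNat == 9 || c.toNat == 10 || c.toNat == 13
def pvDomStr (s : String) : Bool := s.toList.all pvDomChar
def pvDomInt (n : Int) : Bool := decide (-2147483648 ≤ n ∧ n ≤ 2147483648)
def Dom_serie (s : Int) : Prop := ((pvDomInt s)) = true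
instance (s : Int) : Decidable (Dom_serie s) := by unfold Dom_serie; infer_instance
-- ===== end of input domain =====

-- B replaces A's repeated string digit-summing loop with the closed-form digital root (simpler).

-- ===== PORT A =====
-- the while-loop, ported with ample fuel (fuel only makes the recursion total; it is
-- never exhausted on the values A's loop reaches, since r ≤ 64 needs at most 2 rounds).
-- int(a) for a single digit char is ported exactly as PySem.Int.ofChars? [a] (getD 0 unreachable).
def serieLoop : Nat → Int → List Char → Bool → Int
  | 0, x, _, _ => x
  | fuel+1, x, y, con =>
    if con = true then
      let x := y.foldl (fun x a => x + (PySem.Int.ofChars? [a]).getD 0) x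
      if x < 10 then serieLoop fuel x y false
      else serieLoop fuel 0 (PySem.Int.toChars x) true
    else x

def serie (s : Int) : Int :=
  let s := PySem.Int.mod s 6
  -- exponent s+1 ≥ 1 here (s = mod ≥ 0), so 2**(s+1) is the integer power
  let r : Int := (2 : Int) ^ ((s + 1).toNat)
  serieLoop (r.toNat + 10) 0 (PySem.Int.toChars r) true

-- ===== PORT B =====
def serie_alt (s : Int) : Int :=
  let r : Int := (2 : Int) ^ (((PySem.Int.mod s 6) + 1).toNat)
  1 + PySem.Int.mod (r - 1) 9

-- ===== PRECONDITION & SPEC =====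
def Spec_serie (s : Int) (out : Int) : Prop := out = serie_alt s
instance (s : Int) (out : Int) : Decidable (Spec_serie s out) := by unfold Spec_serie; infer_instance

-- ===== CLAIM (what is proved, stated in full; the proofs are below) =====
def Claim_equal_serie : Prop := ∀ (s : Int), Dom_serie s → Spec_serie s (serie s)

-- ===== LEMMAS AND PROOFS =====
theorem serie_core (m : Int) (h0 : 0 ≤ m) (h1 : m < 6) : serie m = serie_alt m := by
  have hm : PySem.Int.mod m 6 = m := by
    rw [PySem.Int.mod_eq_emod_of_pos (by norm_num)]
    omega
  interval_cases m <;> decide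

theorem serie_mod_self (s : Int) :
    PySem.Int.mod (PySem.Int.mod s 6) 6 = PySem.Int.mod s 6 := by
  have h0 := PySem.Int.mod_nonneg s (b := 6) (by norm_num)
  have h1 := PySem.Int.mod_lt s (b := 6) (by norm_num)
  rw [PySem.Int.mod_eq_emod_of_pos (by norm_num)]
  omega

-- ===== VERDICT (by name: the statement is the Claim_ definition above) =====
theorem serie_spec : Claim_equal_serie := by
  intro s _
  unfold Spec_serie
  have h0 := PySem.Int.mod_nonneg s (b := 6) (by norm_num)
  have h1 := PySem.Int.mod_lt s (b := 6) (by norm_num)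
  have key := serie_core (PySem.Int.mod s 6) h0 h1
  unfold serie serie_alt at key ⊢
  rw [serie_mod_self] at key
  exact key
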